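-- pv_equiv track=rewrite | github.com/maxcarriere/lectura-modules | Formules/src/lectura_formules/lecture_formules.py | _segment_decimal_zeros
-- ===== SOURCE A (Python) =====
-- def _segment_decimal_zeros(s: str) -> list[tuple[str, str]]:
--     """Segmente une chaîne décimale en runs de zéros (≥3) et portions de chiffres.
--
--     Retourne [(segment_str, "zeros"|"digits"), ...].
--     Ex: "0000002540000024" → [("000000","zeros"),("254","digits"),("00000","zeros"),("24","digits")]
--     Ex: "002500045800001457" → [("0025","digits"),("000","zeros"),("458","digits"),("0000","zeros"),("1457","digits")]
--     """
--     segments: list[tuple[str, str]] = []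
--     i = 0
--     n = len(s)
--     while i < n:
--         # Vérifier si on a un run de zéros ≥3
--         if s[i] == "0":
--             j = i
--             while j < n and s[j] == "0":
--                 j += 1
--             if j - i >= 3:
--                 segments.append((s[i:j], "zeros"))
--                 i = j
--                 continue
--         # Pas un run de zéros ≥3 : avancer jusqu'au prochain run ≥3
--         j = i
--         while j < n:
--             if s[j] == "0":
--                 k = j
--                 while k < n and s[k] == "0":
--                     k += 1
--                 if k - j >= 3:
--                     break  # trouvé, arrêter le segment digits ici
--                 j = k
--             else:
--                 j += 1
--         segments.append((s[i:j], "digits"))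
--         i = j
--     return segments
-- ===== SOURCE B (Python) =====
-- def _segment_decimal_zeros(s: str) -> list[tuple[str, str]]:
--     """Single-pass state machine: counts the current zero run and buffers pending
--     digit characters; flushes when a non-zero char ends a run of >=3 zeros, and
--     once more at the end. No lookahead, no slicing."""
--     segments: list[tuple[str, str]] = []
--     pending: list[str] = []
--     run0 = 0
--     for c in s:
--         if c == "0":
--             run0 += 1
--         else:
--             if run0 >= 3:
--                 if pending:
--                     segments.append(("".join(pending), "digits"))
--                 segments.append(("0" * run0, "zeros"))
--                 pending = [c]
--             else:
--                 pending.extend("0" * run0)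
--                 pending.append(c)
--             run0 = 0
--     if run0 >= 3:
--         if pending:
--             segments.append(("".join(pending), "digits"))
--         segments.append(("0" * run0, "zeros"))
--     else:
--         pending.extend("0" * run0)
--         if pending:
--             segments.append(("".join(pending), "digits"))
--     return segments
-- ===== Notes on version B (the rewrite author's own statement) =====
-- stated objective: alternative
-- what changed: Replaced A's nested lookahead while-loops (inner zero-run scan plus a digits-scan that re-finds the next long zero run, then slicing) with a single forward pass over the characters maintaining a state machine (pending digit buffer, current zero-run counter) that flushes segments as runs end.
import Mathlib
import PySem

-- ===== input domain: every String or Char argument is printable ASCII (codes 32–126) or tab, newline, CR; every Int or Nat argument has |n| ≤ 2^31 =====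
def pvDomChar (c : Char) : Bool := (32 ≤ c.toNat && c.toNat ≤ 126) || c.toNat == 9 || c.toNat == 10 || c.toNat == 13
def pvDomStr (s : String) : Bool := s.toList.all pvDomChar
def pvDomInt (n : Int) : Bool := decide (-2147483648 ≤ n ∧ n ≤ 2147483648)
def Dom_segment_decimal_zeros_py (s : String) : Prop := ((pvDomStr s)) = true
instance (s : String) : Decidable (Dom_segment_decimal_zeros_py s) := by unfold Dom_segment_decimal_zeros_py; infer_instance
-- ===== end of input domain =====

-- B replaces A's nested lookahead while-loops by a one-pass state-machine fold
-- (pending digit buffer + current zero-run counter); objective: alternative.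

-- ===== PORT A =====

-- inner `while j < n and s[j] == "0": j += 1` of A: length of the leading zero run
def zRunA : List Char → Nat
  | [] => 0
  | c :: t => if c = '0' then 1 + zRunA t else 0

-- middle loop of A: distance from i to the start of the next zero run of length ≥ 3
def dScanA : List Char → Nat
  | [] => 0
  | c :: t =>
    if c = '0' then
      if 3 ≤ zRunA (c :: t) then 0
      else zRunA (c :: t) + dScanA (List.drop (zRunA (c :: t)) (c :: t))
    else 1 + dScanA t
termination_by l => l.length
decreasing_by
  · simp only [List.length_drop, zRunA, if_pos ‹c = '0'›, List.length_cons]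
    omega
  · simp

-- needed by segA's termination: the digits branch always advances
theorem dScanA_pos (c : Char) (t : List Char) (h : ¬(c = '0' ∧ 3 ≤ zRunA (c :: t))) :
    1 ≤ dScanA (c :: t) := by
  by_cases hc : c = '0'
  · have h3 : ¬ 3 ≤ zRunA (c :: t) := fun hz => h ⟨hc, hz⟩
    have hz : zRunA (c :: t) = 1 + zRunA t := by simp [zRunA, hc]
    rw [dScanA, if_pos hc, if_neg h3, hz]
    omega
  · rw [dScanA, if_neg hc]
    omega

-- outer while loop of A
def segA : List Char → List (List Char × String)
  | [] => []
  | c :: t =>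
    if c = '0' ∧ 3 ≤ zRunA (c :: t) then
      ((c :: t).take (zRunA (c :: t)), "zeros") :: segA ((c :: t).drop (zRunA (c :: t)))
    else
      ((c :: t).take (dScanA (c :: t)), "digits") :: segA ((c :: t).drop (dScanA (c :: t)))
termination_by l => l.length
decreasing_by
  · simp only [List.length_drop, List.length_cons]
    omega
  · have := dScanA_pos c t ‹_›
    simp only [List.length_drop, List.length_cons]
    omega

def segment_decimal_zeros_py (s : String) : List (String × String) :=
  (segA s.toList).map (fun p => (String.mk p.1, p.2))

-- ===== PORT B =====

-- one step of B's for-loop: state = (segments, pending digit chars, current zero-run count)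
def stepB (st : List (List Char × String) × List Char × Nat) (c : Char) :
    List (List Char × String) × List Char × Nat :=
  let (segs, pend, r) := st
  if c = '0' then (segs, pend, r + 1)
  else if 3 ≤ r then
    ((if pend = [] then segs else segs ++ [(pend, "digits")]) ++
      [(List.replicate r '0', "zeros")], [c], 0)
  else (segs, pend ++ List.replicate r '0' ++ [c], 0)

-- B's code after the loop
def finB (st : List (List Char × String) × List Char × Nat) : List (List Char × String) :=
  let (segs, pend, r) := st
  if 3 ≤ r then
    (if pend = [] then segs else segs ++ [(pend, "digits")]) ++
      [(List.replicate r '0', "zeros")]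
  else if pend ++ List.replicate r '0' = [] then segs
  else segs ++ [(pend ++ List.replicate r '0', "digits")]

def segB (l : List Char) : List (List Char × String) :=
  finB (l.foldl stepB ([], [], 0))

def segment_decimal_zeros_py_alt (s : String) : List (String × String) :=
  (segB s.toList).map (fun p => (String.mk p.1, p.2))

-- ===== PRECONDITION & SPEC =====
def Spec_segment_decimal_zeros_py (s : String) (out : List (String × String)) : Prop := out = segment_decimal_zeros_py_alt s
instance (s : String) (out : List (String × String)) : Decidable (Spec_segment_decimal_zeros_py s out) := by unfold Spec_segment_decimal_zeros_py; infer_instance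

-- ===== CLAIM (what is proved, stated in full; the proofs are below) =====
def Claim_equal_segment_decimal_zeros_py : Prop := ∀ (s : String), Dom_segment_decimal_zeros_py s → Spec_segment_decimal_zeros_py s (segment_decimal_zeros_py s)

-- ===== LEMMAS AND PROOFS =====

-- shape invariant of B's pending buffer: blocks "fewer than 3 zeros, then a non-zero char"
inductive OkP : List Char → Prop
  | nil : OkP []
  | block (k : Nat) (c : Char) (t : List Char) (hk : k < 3) (hc : c ≠ '0') (ht : OkP t) :
      OkP (List.replicate k '0' ++ c :: t)

theorem zRunA_replicate (k : Nat) : zRunA (List.replicate k '0') = k := by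
  induction k with
  | zero => simp [zRunA]
  | succ n ih => simp [List.replicate_succ, zRunA, ih]; omega

theorem zRunA_replicate_append (k : Nat) (c : Char) (t : List Char) (hc : c ≠ '0') :
    zRunA (List.replicate k '0' ++ c :: t) = k := by
  induction k with
  | zero => simp [zRunA, hc]
  | succ n ih => simp [List.replicate_succ, zRunA, ih]; omega

theorem okp_push (p : List Char) (hp : OkP p) (r : Nat) (hr : r < 3) (c : Char) (hc : c ≠ '0') :
    OkP (p ++ List.replicate r '0' ++ [c]) := by
  induction hp with
  | nil => simpa using OkP.block r c [] hr hc OkP.nil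
  | block k d t hk hd _ ih =>
    have : (List.replicate k '0' ++ d :: t) ++ List.replicate r '0' ++ [c]
        = List.replicate k '0' ++ d :: (t ++ List.replicate r '0' ++ [c]) := by simp
    rw [this]
    exact OkP.block k d _ hk hd ih

theorem dScanA_zero_cons (t : List Char) (h : 3 ≤ zRunA ('0' :: t)) :
    dScanA ('0' :: t) = 0 := by
  rw [dScanA, if_pos rfl, if_pos h]

theorem dScanA_big_append (r : Nat) (hr : 3 ≤ r) (c : Char) (hc : c ≠ '0') (t : List Char) :
    dScanA (List.replicate r '0' ++ c :: t) = 0 := by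
  obtain ⟨r', rfl⟩ : ∃ r', r = r' + 1 := ⟨r - 1, by omega⟩
  simp only [List.replicate_succ, List.cons_append]
  apply dScanA_zero_cons
  have := zRunA_replicate_append (r' + 1) c t hc
  simp only [List.replicate_succ, List.cons_append] at this
  omega

theorem dScanA_big_end (r : Nat) (hr : 3 ≤ r) : dScanA (List.replicate r '0') = 0 := by
  obtain ⟨r', rfl⟩ : ∃ r', r = r' + 1 := ⟨r - 1, by omega⟩
  simp only [List.replicate_succ]
  apply dScanA_zero_cons
  have := zRunA_replicate (r' + 1)
  simp only [List.replicate_succ] at this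
  omega

theorem dScanA_zero_append (p : List Char) (hp : OkP p) (X : List Char) (hX : dScanA X = 0) :
    dScanA (p ++ X) = p.length := by
  induction hp with
  | nil => simpa using hX
  | block k d t' hk hd _ ih =>
    have hre : (List.replicate k '0' ++ d :: t') ++ X
        = List.replicate k '0' ++ d :: (t' ++ X) := by simp
    rw [hre]
    rcases Nat.eq_zero_or_pos k with hk0 | hkpos
    · subst hk0
      simp only [List.replicate, List.nil_append]
      rw [dScanA, if_neg hd, ih]
      simp
      omega
    · obtain ⟨k', rfl⟩ : ∃ k', k = k' + 1 := ⟨k - 1, by omega⟩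
      simp only [List.replicate_succ, List.cons_append]
      rw [dScanA, if_pos rfl]
      have hz : zRunA ('0' :: (List.replicate k' '0' ++ d :: (t' ++ X))) = k' + 1 := by
        have := zRunA_replicate_append (k' + 1) d (t' ++ X) hd
        simpa [List.replicate_succ] using this
      rw [hz, if_neg (by omega)]
      have hdrop : List.drop (k' + 1) ('0' :: (List.replicate k' '0' ++ d :: (t' ++ X)))
          = d :: (t' ++ X) := by
        simp
      rw [hdrop, dScanA, if_neg hd, ih]
      simp
      omega

theorem dScanA_okp_end (p : List Char) (hp : OkP p) (r : Nat) (hr : r < 3) :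
    dScanA (p ++ List.replicate r '0') = p.length + r := by
  induction hp with
  | nil =>
    rcases Nat.eq_zero_or_pos r with h0 | hpos
    · subst h0; simp [dScanA]
    · obtain ⟨r', rfl⟩ : ∃ r', r = r' + 1 := ⟨r - 1, by omega⟩
      simp only [List.nil_append, List.replicate_succ]
      rw [dScanA, if_pos rfl]
      have hz : zRunA ('0' :: List.replicate r' '0') = r' + 1 := by
        have := zRunA_replicate (r' + 1)
        simpa [List.replicate_succ] using this
      rw [hz, if_neg (by omega)]
      have hdrop : List.drop (r' + 1) ('0' :: List.replicate r' '0') = [] := by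
        simp
      rw [hdrop, dScanA]
      simp
  | block k d t' hk hd _ ih =>
    have hre : (List.replicate k '0' ++ d :: t') ++ List.replicate r '0'
        = List.replicate k '0' ++ d :: (t' ++ List.replicate r '0') := by simp
    rw [hre]
    rcases Nat.eq_zero_or_pos k with hk0 | hkpos
    · subst hk0
      simp only [List.replicate, List.nil_append]
      rw [dScanA, if_neg hd, ih]
      simp
      omega
    · obtain ⟨k', rfl⟩ : ∃ k', k = k' + 1 := ⟨k - 1, by omega⟩
      simp only [List.replicate_succ, List.cons_append]
      rw [dScanA, if_pos rfl]
      have hz : zRunA ('0' :: (List.replicate k' '0' ++ d :: (t' ++ List.replicate r '0'))) = k' + 1 := by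
        have := zRunA_replicate_append (k' + 1) d (t' ++ List.replicate r '0') hd
        simpa [List.replicate_succ] using this
      rw [hz, if_neg (by omega)]
      have hdrop : List.drop (k' + 1) ('0' :: (List.replicate k' '0' ++ d :: (t' ++ List.replicate r '0')))
          = d :: (t' ++ List.replicate r '0') := by
        simp
      rw [hdrop, dScanA, if_neg hd, ih]
      simp
      omega

-- a nonempty OkP buffer never starts with a zero run of length ≥ 3
theorem okp_head_no_big_run (k : Nat) (d : Char) (t : List Char) (hk : k < 3) (hd : d ≠ '0')
    (X : List Char) :
    ∀ c t', List.replicate k '0' ++ d :: t ++ X = c :: t' → ¬(c = '0' ∧ 3 ≤ zRunA (c :: t')) := by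
  intro c t' he hcon
  have hz : zRunA (List.replicate k '0' ++ d :: (t ++ X)) = k := zRunA_replicate_append k d (t ++ X) hd
  rcases hcon with ⟨hc0, h3⟩
  have : zRunA (c :: t') = k := by rw [← he]; simpa using hz
  omega

theorem segA_zrun (r : Nat) (hr : 3 ≤ r) (c : Char) (hc : c ≠ '0') (t : List Char) :
    segA (List.replicate r '0' ++ c :: t) = (List.replicate r '0', "zeros") :: segA (c :: t) := by
  obtain ⟨r', rfl⟩ : ∃ r', r = r' + 1 := ⟨r - 1, by omega⟩
  have hz : zRunA ('0' :: (List.replicate r' '0' ++ c :: t)) = r' + 1 := by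
    have := zRunA_replicate_append (r' + 1) c t hc
    simpa [List.replicate_succ] using this
  simp only [List.replicate_succ, List.cons_append]
  rw [segA, if_pos ⟨rfl, by omega⟩]
  rw [hz]
  have htake : List.take (r' + 1) ('0' :: (List.replicate r' '0' ++ c :: t))
      = '0' :: List.replicate r' '0' := by
    simp [List.take_succ_cons]
  have hdrop : List.drop (r' + 1) ('0' :: (List.replicate r' '0' ++ c :: t)) = c :: t := by
    simp [List.drop_succ_cons]
  rw [htake, hdrop]

theorem segA_zrun_end (r : Nat) (hr : 3 ≤ r) :
    segA (List.replicate r '0') = [(List.replicate r '0', "zeros")] := by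
  obtain ⟨r', rfl⟩ : ∃ r', r = r' + 1 := ⟨r - 1, by omega⟩
  have hz : zRunA ('0' :: List.replicate r' '0') = r' + 1 := by
    have := zRunA_replicate (r' + 1)
    simpa [List.replicate_succ] using this
  simp only [List.replicate_succ]
  rw [segA, if_pos ⟨rfl, by omega⟩]
  rw [hz]
  simp [segA]

theorem segA_okp_prefix (p : List Char) (hp : OkP p) (hne : p ≠ []) (X : List Char)
    (hX : dScanA X = 0) :
    segA (p ++ X) = (p, "digits") :: segA X := by
  cases hp with
  | nil => exact absurd rfl hne
  | block k d t' hk hd ht =>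
    obtain ⟨e, l', he⟩ : ∃ e l', List.replicate k '0' ++ d :: t' ++ X = e :: l' := by
      cases hL : List.replicate k '0' ++ d :: t' ++ X with
      | nil => simp at hL
      | cons e l' => exact ⟨e, l', rfl⟩
    have hassoc : (List.replicate k '0' ++ d :: t') ++ X
        = List.replicate k '0' ++ d :: t' ++ X := by simp
    rw [hassoc, he, segA, if_neg (okp_head_no_big_run k d t' hk hd X e l' he)]
    have hds : dScanA (e :: l') = (List.replicate k '0' ++ d :: t').length := by
      rw [← he]
      have := dScanA_zero_append (List.replicate k '0' ++ d :: t')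
        (OkP.block k d t' hk hd ht) X hX
      simpa [List.append_assoc] using this
    rw [hds]
    have htake : List.take (List.replicate k '0' ++ d :: t').length (e :: l')
        = List.replicate k '0' ++ d :: t' := by
      rw [← he, ← hassoc]
      exact List.take_left
    have hdrop : List.drop (List.replicate k '0' ++ d :: t').length (e :: l') = X := by
      rw [← he, ← hassoc]
      exact List.drop_left
    rw [htake, hdrop]

theorem segA_okp_digits (p : List Char) (hp : OkP p) (r : Nat) (hr : r < 3) :
    segA (p ++ List.replicate r '0')
      = if p ++ List.replicate r '0' = [] then []
        else [(p ++ List.replicate r '0', "digits")] := by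
  by_cases hnil : p ++ List.replicate r '0' = []
  · rw [hnil]; simp [segA]
  · obtain ⟨e, l', he⟩ : ∃ e l', p ++ List.replicate r '0' = e :: l' := by
      cases h : p ++ List.replicate r '0' with
      | nil => exact absurd h hnil
      | cons a b => exact ⟨a, b, rfl⟩
    have hnobig : ¬(e = '0' ∧ 3 ≤ zRunA (e :: l')) := by
      cases hp with
      | nil =>
        intro hcon
        have : zRunA (List.replicate r '0') = r := zRunA_replicate r
        rw [List.nil_append] at he
        rw [he] at this
        omega
      | block k d t' hk hd ht =>
        have he' : List.replicate k '0' ++ d :: t' ++ List.replicate r '0' = e :: l' := he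
        exact okp_head_no_big_run k d t' hk hd (List.replicate r '0') e l' he'
    have hds : dScanA (e :: l') = p.length + r := by
      rw [← he]; exact dScanA_okp_end p hp r hr
    have hlen : (e :: l').length = p.length + r := by
      rw [← he]; simp
    rw [if_neg hnil, he, segA, if_neg hnobig, hds]
    have htake : List.take (p.length + r) (e :: l') = e :: l' := by
      apply List.take_of_length_le; omega
    have hdrop : List.drop (p.length + r) (e :: l') = [] := by
      apply List.drop_eq_nil_of_le; omega
    rw [htake, hdrop, ← he]
    simp [segA]

-- main loop invariant: running B's fold from state (segs, pend, r) with an OkP buffer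
-- produces segs ++ A's segmentation of the not-yet-flushed input
theorem foldB_spec (l : List Char) :
    ∀ (segs : List (List Char × String)) (pend : List Char) (r : Nat), OkP pend →
      finB (l.foldl stepB (segs, pend, r))
        = segs ++ segA (pend ++ List.replicate r '0' ++ l) := by
  induction l with
  | nil =>
    intro segs pend r hp
    simp only [List.foldl_nil, List.append_nil]
    by_cases hr : 3 ≤ r
    · have hseg : segA (pend ++ List.replicate r '0')
          = (if pend = [] then [] else [(pend, "digits")])
            ++ [(List.replicate r '0', "zeros")] := by
        by_cases hpe : pend = []
        · subst hpe; simp [segA_zrun_end r hr]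
        · rw [if_neg hpe,
            segA_okp_prefix pend hp hpe (List.replicate r '0') (dScanA_big_end r hr),
            segA_zrun_end r hr]
          simp
      rw [hseg]
      simp only [finB, if_pos hr]
      by_cases hpe : pend = [] <;> simp [hpe]
    · rw [segA_okp_digits pend hp r (by omega)]
      simp only [finB, if_neg hr]
      by_cases hpn : pend ++ List.replicate r '0' = [] <;> simp [hpn]
  | cons c l' ih =>
    intro segs pend r hp
    rw [List.foldl_cons]
    by_cases hc : c = '0'
    · rw [show stepB (segs, pend, r) c = (segs, pend, r + 1) from by simp [stepB, hc]]
      rw [ih segs pend (r + 1) hp]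
      have : pend ++ List.replicate (r + 1) '0' ++ l'
          = pend ++ List.replicate r '0' ++ c :: l' := by
        rw [List.replicate_succ', hc]; simp
      rw [this]
    · by_cases hr : 3 ≤ r
      · rw [show stepB (segs, pend, r) c
            = ((if pend = [] then segs else segs ++ [(pend, "digits")])
                ++ [(List.replicate r '0', "zeros")], [c], 0) from by
          simp [stepB, hc, hr]]
        rw [ih _ [c] 0 (by simpa using OkP.block 0 c [] (by omega) hc OkP.nil)]
        have hcl : ([c] : List Char) ++ List.replicate 0 '0' ++ l' = c :: l' := by simp
        rw [hcl]
        by_cases hpe : pend = []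
        · subst hpe
          simp only [List.nil_append]
          rw [segA_zrun r hr c hc l']
          simp
        · rw [List.append_assoc pend,
            segA_okp_prefix pend hp hpe (List.replicate r '0' ++ c :: l')
              (dScanA_big_append r hr c hc l'),
            segA_zrun r hr c hc l', if_neg hpe]
          simp
      · rw [show stepB (segs, pend, r) c = (segs, pend ++ List.replicate r '0' ++ [c], 0) from by
          simp [stepB, hc, hr]]
        rw [ih segs _ 0 (okp_push pend hp r (by omega) c hc)]
        have : (pend ++ List.replicate r '0' ++ [c]) ++ List.replicate 0 '0' ++ l'
            = pend ++ List.replicate r '0' ++ c :: l' := by simp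
        rw [this]

-- ===== VERDICT (by name: the statement is the Claim_ definition above) =====
theorem segment_decimal_zeros_py_spec : Claim_equal_segment_decimal_zeros_py := by
  intro s _hd
  unfold Spec_segment_decimal_zeros_py segment_decimal_zeros_py segment_decimal_zeros_py_alt segB
  have := foldB_spec s.toList [] [] 0 OkP.nil
  rw [this]
  simp
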